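-- pv_equiv track=rewrite | github.com/coolcat702/Interpreter_test | src/trmc.py | remove_excess
-- ===== SOURCE A (Python) =====
-- def remove_excess(input_string: str) -> str:
--     res: str = ""
--     found: bool = False
--
--     for char in input_string:
--         if char.isdigit():
--             res += char
--             found = True
--         elif found:
--             break
--         else:
--             res += char
--
--     return res
-- ===== SOURCE B (Python) =====
-- def remove_excess(input_string: str) -> str:
--     n = len(input_string)
--     i = 0
--     while i < n and not input_string[i].isdigit():
--         i += 1
--     while i < n and input_string[i].isdigit():
--         i += 1
--     return input_string[:i]
-- ===== Notes on version B (the rewrite author's own statement) =====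
-- stated objective: alternative
-- what changed: B never builds the result character by character: instead of A's flagged accumulating loop with a break, it computes a single cut index (advance past the non-digit prefix, then past the digit run) and returns one slice input_string[:i].
import Mathlib
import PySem

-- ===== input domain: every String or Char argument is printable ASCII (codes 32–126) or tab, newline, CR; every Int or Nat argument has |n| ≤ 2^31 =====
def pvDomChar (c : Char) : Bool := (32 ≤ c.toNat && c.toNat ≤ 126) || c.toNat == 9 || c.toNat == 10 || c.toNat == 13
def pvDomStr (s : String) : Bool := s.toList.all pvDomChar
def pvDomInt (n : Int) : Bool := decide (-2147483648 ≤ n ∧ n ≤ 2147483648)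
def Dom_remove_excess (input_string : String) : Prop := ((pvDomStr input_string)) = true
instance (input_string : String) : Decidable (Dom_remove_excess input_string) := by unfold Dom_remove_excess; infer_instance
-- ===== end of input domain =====

-- B replaces A's flagged accumulating loop by computing a single cut index with two index-advance loops and returning one slice; same O(n) cost.


-- ===== PORT A =====
def remove_excess.go : List Char → List Char → Bool → List Char
  | [], res, _ => res
  | c :: cs, res, found =>
    if PySem.Chars.isdigit c then remove_excess.go cs (res ++ [c]) true
    else if found then res
    else remove_excess.go cs (res ++ [c]) false

def remove_excess (input_string : String) : String :=
  String.mk (remove_excess.go input_string.toList [] false)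

-- ===== PORT B =====
-- first while loop: advance i past non-digit characters
def remove_excess_alt.skipNonDigits (cs : List Char) (i : Nat) : Nat :=
  if h : i < cs.length then
    if PySem.Chars.isdigit cs[i] then i
    else remove_excess_alt.skipNonDigits cs (i + 1)
  else i
termination_by cs.length - i

-- second while loop: advance i past digit characters
def remove_excess_alt.skipDigits (cs : List Char) (i : Nat) : Nat :=
  if h : i < cs.length then
    if PySem.Chars.isdigit cs[i] then remove_excess_alt.skipDigits cs (i + 1)
    else i
  else i
termination_by cs.length - i

def remove_excess_alt (input_string : String) : String :=
  let cs := input_string.toList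
  let i := remove_excess_alt.skipDigits cs (remove_excess_alt.skipNonDigits cs 0)
  String.mk (cs.take i)   -- input_string[:i]

-- ===== PRECONDITION & SPEC =====
def Spec_remove_excess (input_string : String) (out : String) : Prop := out = remove_excess_alt input_string
instance (input_string : String) (out : String) : Decidable (Spec_remove_excess input_string out) := by unfold Spec_remove_excess; infer_instance

-- ===== CLAIM (what is proved, stated in full; the proofs are below) =====
def Claim_equal_remove_excess : Prop := ∀ (input_string : String), Dom_remove_excess input_string → Spec_remove_excess input_string (remove_excess input_string)

-- ===== LEMMAS AND PROOFS =====
lemma go_true (cs res : List Char) :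
    remove_excess.go cs res true = res ++ cs.takeWhile PySem.Chars.isdigit := by
  induction cs generalizing res with
  | nil => simp [remove_excess.go]
  | cons c cs ih =>
    by_cases h : PySem.Chars.isdigit c
    · simp [remove_excess.go, h, ih]
    · simp [remove_excess.go, h]

lemma go_false (cs res : List Char) :
    remove_excess.go cs res false =
      res ++ cs.takeWhile (fun c => !PySem.Chars.isdigit c) ++
        (cs.drop (cs.takeWhile (fun c => !PySem.Chars.isdigit c)).length).takeWhile
          PySem.Chars.isdigit := by
  induction cs generalizing res with
  | nil => simp [remove_excess.go]
  | cons c cs ih =>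
    by_cases h : PySem.Chars.isdigit c
    · simp [remove_excess.go, h, go_true]
    · simp [remove_excess.go, h, ih]

lemma skipNonDigits_eq (cs : List Char) (i : Nat) :
    remove_excess_alt.skipNonDigits cs i =
      i + ((cs.drop i).takeWhile (fun c => !PySem.Chars.isdigit c)).length := by
  induction i using remove_excess_alt.skipNonDigits.induct cs with
  | case1 i h hd =>
    rw [remove_excess_alt.skipNonDigits]
    rw [List.drop_eq_getElem_cons h]
    simp [hd]
  | case2 i h hd ih =>
    rw [remove_excess_alt.skipNonDigits]
    rw [List.drop_eq_getElem_cons h]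
    simp only [h, dif_pos, hd, ih, List.takeWhile_cons, Bool.not_false]
    simp
    omega
  | case3 i h =>
    rw [remove_excess_alt.skipNonDigits]
    simp [h, List.drop_eq_nil_of_le (Nat.le_of_not_lt h)]

lemma skipDigits_eq (cs : List Char) (i : Nat) :
    remove_excess_alt.skipDigits cs i =
      i + ((cs.drop i).takeWhile PySem.Chars.isdigit).length := by
  induction i using remove_excess_alt.skipDigits.induct cs with
  | case1 i h hd ih =>
    rw [remove_excess_alt.skipDigits]
    rw [List.drop_eq_getElem_cons h]
    simp only [h, dif_pos, hd, if_pos, ih, List.takeWhile_cons]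
    simp
    omega
  | case2 i h hd =>
    rw [remove_excess_alt.skipDigits]
    rw [List.drop_eq_getElem_cons h]
    simp [hd]
  | case3 i h =>
    rw [remove_excess_alt.skipDigits]
    simp [h, List.drop_eq_nil_of_le (Nat.le_of_not_lt h)]

lemma take_len_takeWhile {α : Type} (p : α → Bool) (l : List α) :
    l.take (l.takeWhile p).length = l.takeWhile p := by
  induction l with
  | nil => simp
  | cons a l ih =>
    by_cases h : p a
    · simp [h, ih]
    · simp [h]

-- ===== VERDICT (by name: the statement is the Claim_ definition above) =====
theorem remove_excess_spec : Claim_equal_remove_excess := by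
  intro s _
  show remove_excess s = remove_excess_alt s
  simp only [remove_excess, remove_excess_alt, go_false, skipNonDigits_eq, skipDigits_eq,
    List.drop_zero, Nat.zero_add, List.nil_append]
  rw [List.take_add, take_len_takeWhile, take_len_takeWhile]
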